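-- pv_equiv track=rewrite | github.com/hanmo2000110/BOJ_STUDY | 백준/Gold/1239. 차트/차트.py | count_center_lines
-- ===== SOURCE A (Python) =====
-- def count_center_lines(sequence):
--     # 누적합 배열 생성
--     prefix_sum = []
--     current_sum = 0
--     for num in sequence:
--         current_sum += num
--         prefix_sum.append(current_sum)
--
--     # 중심선 개수 세기
--     count = 0
--     for i in range(len(prefix_sum)-1):
--         for j in range(i+1, len(prefix_sum)):
--             if prefix_sum[i] + 50 == prefix_sum[j]:
--                 count += 1
--     return count
-- ===== SOURCE B (Python) =====
-- def count_center_lines(sequence):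
--     # One pass: for each prefix sum s, add how many earlier prefix sums equal s - 50.
--     seen = {}
--     count = 0
--     s = 0
--     for num in sequence:
--         s += num
--         count += seen.get(s - 50, 0)
--         seen[s] = seen.get(s, 0) + 1
--     return count
-- ===== Notes on version B (the rewrite author's own statement) =====
-- stated objective: faster
-- what changed: Replaces the quadratic double loop over prefix-sum indices by a single pass that keeps a hash-map counter of prefix sums seen so far and looks up s-50 at each step.
import Mathlib
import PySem

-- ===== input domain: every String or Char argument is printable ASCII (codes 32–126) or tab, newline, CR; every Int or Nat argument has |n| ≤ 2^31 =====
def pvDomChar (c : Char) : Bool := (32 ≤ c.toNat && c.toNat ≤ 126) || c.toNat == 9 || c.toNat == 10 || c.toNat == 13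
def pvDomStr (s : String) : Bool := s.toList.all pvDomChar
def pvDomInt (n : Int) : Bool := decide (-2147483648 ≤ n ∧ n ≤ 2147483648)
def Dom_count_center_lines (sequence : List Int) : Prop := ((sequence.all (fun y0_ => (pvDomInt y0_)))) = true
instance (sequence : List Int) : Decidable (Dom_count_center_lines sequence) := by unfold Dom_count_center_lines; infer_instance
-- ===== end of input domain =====

-- B replaces A's quadratic double loop over prefix-sum indices by a single pass keeping a
-- hash-map counter of prefix sums seen so far (lookup of s-50); measurably faster (asymptotic).


-- ===== PORT A =====
def count_center_lines (sequence : List Int) : Int :=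
  -- prefix_sum built by appending the running sum
  let prefix_sum :=
    (sequence.foldl (fun st num => (st.1 ++ [st.2 + num], st.2 + num))
      (([] : List Int), (0 : Int))).1
  -- double loop over index pairs i < j
  (PySem.List.pyRange 0 ((PySem.List.len prefix_sum) - 1) 1).foldl (fun count i =>
    (PySem.List.pyRange (i + 1) (PySem.List.len prefix_sum) 1).foldl (fun count j =>
      if PySem.List.pyGetD prefix_sum i 0 + 50 == PySem.List.pyGetD prefix_sum j 0
      then count + 1 else count) count) 0

-- ===== PORT B =====
def count_center_lines_alt (sequence : List Int) : Int :=
  -- single pass: state = (seen, count, s)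
  let st := sequence.foldl
    (fun (st : PySem.Dict Int Int × Int × Int) num =>
      let s := st.2.2 + num
      let count := st.2.1 + st.1.getD (s - 50) 0
      (st.1.insert s (st.1.getD s 0 + 1), count, s))
    (PySem.Dict.empty, 0, 0)
  st.2.1

-- ===== PRECONDITION & SPEC =====
def Spec_count_center_lines (sequence : List Int) (out : Int) : Prop := out = count_center_lines_alt sequence
instance (sequence : List Int) (out : Int) : Decidable (Spec_count_center_lines sequence out) := by unfold Spec_count_center_lines; infer_instance

-- ===== CLAIM (what is proved, stated in full; the proofs are below) =====
def Claim_equal_count_center_lines : Prop := ∀ (sequence : List Int), Dom_count_center_lines sequence → Spec_count_center_lines sequence (count_center_lines sequence)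

-- ===== LEMMAS AND PROOFS =====

-- prefix sums of l starting from running sum s
def prefList (s : Int) : List Int → List Int
  | [] => []
  | x :: t => (s + x) :: prefList (s + x) t

-- number of pairs i < j in ps with ps[i] + 50 = ps[j], front recursion
def pairCount : List Int → Int
  | [] => 0
  | x :: t => (t.count (x + 50) : Int) + pairCount t

theorem prefFold (l : List Int) : ∀ (acc : List Int) (s : Int),
    l.foldl (fun st num => (st.1 ++ [st.2 + num], st.2 + num)) (acc, s)
      = (acc ++ prefList s l, s + l.sum) := by
  induction l with
  | nil => intro acc s; simp [prefList]
  | cons x t ih =>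
    intro acc s
    simp only [List.foldl_cons, ih, prefList, List.sum_cons, Prod.mk.injEq]
    exact ⟨by simp, by ring⟩

theorem pairCount_snoc (ps : List Int) (y : Int) :
    pairCount (ps ++ [y]) = pairCount ps + (ps.count (y - 50) : Int) := by
  induction ps with
  | nil => simp [pairCount]
  | cons x t ih =>
    simp only [List.cons_append, pairCount, ih, List.count_append, List.count_cons,
      List.count_nil]
    split_ifs with h1 h2 h2
    · push_cast; ring
    · simp only [beq_iff_eq] at h1 h2
      exact absurd (by omega) h2
    · simp only [beq_iff_eq] at h1 h2
      exact absurd (by omega) h1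
    · push_cast; ring

-- ===== A side =====

-- the inner j-loop counts occurrences of ps[i]+50 in the suffix after i
theorem innerLoop (ps : List Int) (i c : Int) (hi : 0 ≤ i) :
    (PySem.List.pyRange (i + 1) (PySem.List.len ps) 1).foldl (fun count j =>
      if PySem.List.pyGetD ps i 0 + 50 == PySem.List.pyGetD ps j 0
      then count + 1 else count) c
    = c + (((ps.drop (i + 1).toNat).count (PySem.List.pyGetD ps i 0 + 50) : Nat) : Int) := by
  have h := PySem.List.foldl_pyRange_pyGetD ps 0
    (fun count v => if PySem.List.pyGetD ps i 0 + 50 == v then count + 1 else count) c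
    (a := i + 1) (by omega)
  rw [h, PySem.List.foldl_count_if, List.count]
  congr 1
  norm_cast
  apply List.countP_congr
  intro a _
  simp only [beq_iff_eq]
  omega

-- A's count over ps, as a sum over Nat indices
theorem outerLoop (ps : List Int) :
    (PySem.List.pyRange 0 ((PySem.List.len ps) - 1) 1).foldl (fun count i =>
      (PySem.List.pyRange (i + 1) (PySem.List.len ps) 1).foldl (fun count j =>
        if PySem.List.pyGetD ps i 0 + 50 == PySem.List.pyGetD ps j 0
        then count + 1 else count) count) 0
    = ((List.range (ps.length - 1)).map (fun k =>
        (((ps.drop (k + 1)).count (ps.getD k 0 + 50) : Nat) : Int))).sum := by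
  have hbody : ∀ c : Int, ∀ i ∈ PySem.List.pyRange 0 ((PySem.List.len ps) - 1) 1,
      (PySem.List.pyRange (i + 1) (PySem.List.len ps) 1).foldl (fun count j =>
        if PySem.List.pyGetD ps i 0 + 50 == PySem.List.pyGetD ps j 0
        then count + 1 else count) c
      = c + (((ps.drop (i + 1).toNat).count (PySem.List.pyGetD ps i 0 + 50) : Nat) : Int) := by
    intro c i hi
    exact innerLoop ps i c (PySem.List.mem_pyRange_one.mp hi).1
  rw [PySem.List.foldl_congr_mem _ _ _ _ hbody, PySem.List.foldl_add, zero_add,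
    PySem.List.pyRange_one, List.map_map]
  have hlen : ((PySem.List.len ps - 1 - 0).toNat) = ps.length - 1 := by
    simp only [PySem.List.len_eq]
    omega
  rw [hlen]
  apply congrArg List.sum
  apply List.map_congr_left
  intro k hk
  simp only [Function.comp_apply]
  rw [show (0 : Int) + (k : Int) = ((k : Int)) from by ring,
    show ((k : Int) + 1).toNat = k + 1 from by omega,
    PySem.List.pyGetD_natCast]

theorem sum_eq_pairCount (ps : List Int) :
    ((List.range (ps.length - 1)).map (fun k =>
        (((ps.drop (k + 1)).count (ps.getD k 0 + 50) : Nat) : Int))).sum = pairCount ps := by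
  induction ps with
  | nil => simp [pairCount]
  | cons x t ih =>
    cases t with
    | nil => simp [pairCount]
    | cons y u =>
      have hmap : (List.range ((y :: u).length - 1)).map
          ((fun k => ((((x :: y :: u).drop (k + 1)).count ((x :: y :: u).getD k 0 + 50) : Nat) : Int)) ∘ Nat.succ)
          = (List.range ((y :: u).length - 1)).map
            (fun k => ((((y :: u).drop (k + 1)).count ((y :: u).getD k 0 + 50) : Nat) : Int)) := by
        apply List.map_congr_left
        intro k _
        simp [Nat.succ_eq_add_one]
      rw [show (x :: y :: u).length - 1 = ((y :: u).length - 1) + 1 from by simp,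
        List.range_succ_eq_map, List.map_cons, List.map_map, List.sum_cons, hmap, ih]
      simp [pairCount]

-- combining: A computes pairCount of the prefix-sum list
theorem countA_eq (sequence : List Int) :
    count_center_lines sequence = pairCount (prefList 0 sequence) := by
  unfold count_center_lines
  rw [prefFold]
  exact (outerLoop (prefList 0 sequence)).trans (sum_eq_pairCount _)

-- ===== B side =====

theorem bLoop (l : List Int) : ∀ (ps : List Int) (d : PySem.Dict Int Int) (c s : Int),
    (∀ v, d.getD v 0 = (ps.count v : Int)) →
    (l.foldl
      (fun (st : PySem.Dict Int Int × Int × Int) num =>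
        let s := st.2.2 + num
        let count := st.2.1 + st.1.getD (s - 50) 0
        (st.1.insert s (st.1.getD s 0 + 1), count, s))
      (d, c, s)).2.1
    = c + pairCount (ps ++ prefList s l) - pairCount ps := by
  induction l with
  | nil => intro ps d c s _; simp [prefList]
  | cons x t ih =>
    intro ps d c s hd
    simp only [List.foldl_cons]
    rw [ih (ps ++ [s + x]) _ _ _ (by
      intro v
      rw [PySem.Dict.getD_insert, List.count_append, List.count_singleton]
      by_cases hv : v = s + x
      · simp [hv, hd]
      · rw [if_neg hv, if_neg (by simpa using fun h => hv h.symm)]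
        simp [hd])]
    rw [pairCount_snoc, hd]
    have : ps ++ prefList s (x :: t) = (ps ++ [s + x]) ++ prefList (s + x) t := by
      simp [prefList]
    rw [this]
    ring

theorem countB_eq (sequence : List Int) :
    count_center_lines_alt sequence = pairCount (prefList 0 sequence) := by
  unfold count_center_lines_alt
  rw [bLoop sequence [] PySem.Dict.empty 0 0 (by intro v; simp)]
  simp [pairCount]

-- ===== VERDICT (by name: the statement is the Claim_ definition above) =====
theorem count_center_lines_spec : Claim_equal_count_center_lines := by
  intro sequence _
  unfold Spec_count_center_lines
  rw [countA_eq, countB_eq]
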